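-- pv_equiv track=rewrite | github.com/evilgaoshu/ragrig | src/ragrig/evaluation/engine.py | _compute_rank_of_expected
-- ===== SOURCE A (Python) =====
-- def _compute_rank_of_expected(
--     query: str,
--     top_doc_uris: list[str],
--     expected_doc_uri: str | None,
--     expected_chunk_uri: str | None,
--     expected_citation: str | None,
--     top_texts: list[str],
-- ) -> int | None:
--     """Find the rank (1-based) of the first expected match in results."""
--     for i, (uri, text) in enumerate(zip(top_doc_uris, top_texts, strict=False)):
--         rank = i + 1
--         if expected_doc_uri is not None and expected_doc_uri in uri:
--             return rank
--         if expected_chunk_uri is not None and (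
--             expected_chunk_uri in uri or uri in expected_chunk_uri
--         ):
--             return rank
--         if expected_citation is not None and expected_citation.lower() in text.lower():
--             return rank
--     return None
-- ===== SOURCE B (Python) =====
-- def _compute_rank_of_expected(
--     query,
--     top_doc_uris,
--     expected_doc_uri,
--     expected_chunk_uri,
--     expected_citation,
--     top_texts,
-- ):
--     n = min(len(top_doc_uris), len(top_texts))
--
--     def first_rank(items, pred):
--         for i, x in enumerate(items, 1):
--             if pred(x):
--                 return i
--         return None
--
--     ranks = []
--     if expected_doc_uri is not None:
--         r = first_rank(top_doc_uris[:n], lambda u: expected_doc_uri in u)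
--         if r is not None:
--             ranks.append(r)
--     if expected_chunk_uri is not None:
--         r = first_rank(
--             top_doc_uris[:n],
--             lambda u: expected_chunk_uri in u or u in expected_chunk_uri,
--         )
--         if r is not None:
--             ranks.append(r)
--     if expected_citation is not None:
--         cit = expected_citation.lower()
--         r = first_rank(top_texts[:n], lambda t: cit in t.lower())
--         if r is not None:
--             ranks.append(r)
--     return min(ranks) if ranks else None
-- ===== Notes on version B (the rewrite author's own statement) =====
-- stated objective: alternative
-- what changed: Replaces the single fused scan over zip(uris,texts) with three independent single-criterion first-match scans (doc-uri, chunk-uri, citation), each truncated to min(len) to mirror zip, combined by taking the minimum rank.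
import Mathlib
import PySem

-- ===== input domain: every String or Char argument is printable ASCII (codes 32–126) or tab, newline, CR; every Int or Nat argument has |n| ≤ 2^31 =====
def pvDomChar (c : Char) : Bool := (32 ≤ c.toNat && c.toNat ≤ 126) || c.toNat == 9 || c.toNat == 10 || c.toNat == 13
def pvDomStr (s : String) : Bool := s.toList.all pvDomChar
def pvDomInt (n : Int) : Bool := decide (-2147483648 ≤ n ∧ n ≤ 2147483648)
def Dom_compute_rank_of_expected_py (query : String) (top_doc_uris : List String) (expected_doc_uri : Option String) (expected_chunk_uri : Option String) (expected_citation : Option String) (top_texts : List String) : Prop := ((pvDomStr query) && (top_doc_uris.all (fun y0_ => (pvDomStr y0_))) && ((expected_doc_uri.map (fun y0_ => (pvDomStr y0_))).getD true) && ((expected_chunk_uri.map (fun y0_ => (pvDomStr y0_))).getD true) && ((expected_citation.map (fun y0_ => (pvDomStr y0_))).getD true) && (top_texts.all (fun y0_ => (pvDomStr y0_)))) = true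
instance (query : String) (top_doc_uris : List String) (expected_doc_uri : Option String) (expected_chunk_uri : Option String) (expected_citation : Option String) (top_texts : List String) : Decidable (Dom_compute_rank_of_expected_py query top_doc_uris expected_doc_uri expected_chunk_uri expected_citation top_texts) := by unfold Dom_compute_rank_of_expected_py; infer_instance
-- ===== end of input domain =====

-- ===== PORT A =====
-- B recomputes the rank as the minimum of three independent single-criterion scans instead of A's fused scan (alternative decomposition; same cost).
def pvALoop (expected_doc_uri expected_chunk_uri expected_citation : Option String) : List (String × String) → Int → Option Int
  | [], _ => none
  | (uri, text) :: rest, i =>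
    if (match expected_doc_uri with
        | some s => PySem.Str.isIn s uri
        | none => false) then some (i + 1)
    else if (match expected_chunk_uri with
        | some s => PySem.Str.isIn s uri || PySem.Str.isIn uri s
        | none => false) then some (i + 1)
    else if (match expected_citation with
        | some s => PySem.Str.isIn (PySem.Str.lower s) (PySem.Str.lower text)
        | none => false) then some (i + 1)
    else pvALoop expected_doc_uri expected_chunk_uri expected_citation rest (i + 1)

def compute_rank_of_expected_py (query : String) (top_doc_uris : List String) (expected_doc_uri : Option String) (expected_chunk_uri : Option String) (expected_citation : Option String) (top_texts : List String) : Option Int :=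
  pvALoop expected_doc_uri expected_chunk_uri expected_citation (top_doc_uris.zip top_texts) 0

-- ===== PORT B =====
-- first_rank: 1-based index of the first element satisfying pred, with running counter (enumerate(items, 1))
def pvFirstRank (p : String → Bool) : List String → Int → Option Int
  | [], _ => none
  | x :: xs, i => if p x then some i else pvFirstRank p xs (i + 1)

-- min of two optional ranks (None = absent); folds Python's min(ranks) over the collected ranks
def pvOMin : Option Int → Option Int → Option Int
  | none, y => y
  | some a, none => some a
  | some a, some b => some (min a b)

def compute_rank_of_expected_py_alt (query : String) (top_doc_uris : List String) (expected_doc_uri : Option String) (expected_chunk_uri : Option String) (expected_citation : Option String) (top_texts : List String) : Option Int :=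
  let n := min top_doc_uris.length top_texts.length
  let r1 : Option Int := match expected_doc_uri with
    | some s => pvFirstRank (fun u => PySem.Str.isIn s u) (top_doc_uris.take n) 1
    | none => none
  let r2 : Option Int := match expected_chunk_uri with
    | some s => pvFirstRank (fun u => PySem.Str.isIn s u || PySem.Str.isIn u s) (top_doc_uris.take n) 1
    | none => none
  let r3 : Option Int := match expected_citation with
    | some s => pvFirstRank (fun t => PySem.Str.isIn (PySem.Str.lower s) (PySem.Str.lower t)) (top_texts.take n) 1
    | none => none
  pvOMin r1 (pvOMin r2 r3)

-- ===== PRECONDITION & SPEC =====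
def Spec_compute_rank_of_expected_py (query : String) (top_doc_uris : List String) (expected_doc_uri : Option String) (expected_chunk_uri : Option String) (expected_citation : Option String) (top_texts : List String) (out : Option Int) : Prop := out = compute_rank_of_expected_py_alt query top_doc_uris expected_doc_uri expected_chunk_uri expected_citation top_texts
instance (query : String) (top_doc_uris : List String) (expected_doc_uri : Option String) (expected_chunk_uri : Option String) (expected_citation : Option String) (top_texts : List String) (out : Option Int) : Decidable (Spec_compute_rank_of_expected_py query top_doc_uris expected_doc_uri expected_chunk_uri expected_citation top_texts out) := by unfold Spec_compute_rank_of_expected_py; infer_instance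

-- ===== CLAIM (what is proved, stated in full; the proofs are below) =====
def Claim_equal_compute_rank_of_expected_py : Prop := ∀ (query : String) (top_doc_uris : List String) (expected_doc_uri : Option String) (expected_chunk_uri : Option String) (expected_citation : Option String) (top_texts : List String), Dom_compute_rank_of_expected_py query top_doc_uris expected_doc_uri expected_chunk_uri expected_citation top_texts → Spec_compute_rank_of_expected_py query top_doc_uris expected_doc_uri expected_chunk_uri expected_citation top_texts (compute_rank_of_expected_py query top_doc_uris expected_doc_uri expected_chunk_uri expected_citation top_texts)

-- ===== LEMMAS AND PROOFS =====

-- any rank returned by pvFirstRank started at i is at least i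
theorem pvFirstRank_lb (p : String → Bool) : ∀ (xs : List String) (i k : Int), pvFirstRank p xs i = some k → i ≤ k := by
  intro xs
  induction xs with
  | nil => intro i k h; simp [pvFirstRank] at h
  | cons x xs ih =>
    intro i k h
    simp only [pvFirstRank] at h
    by_cases hp : p x
    · simp [hp] at h; omega
    · simp [hp] at h; have := ih (i + 1) k h; omega

theorem pvOMin_lb (x y : Option Int) (a : Int) (hx : ∀ k, x = some k → a ≤ k) (hy : ∀ k, y = some k → a ≤ k) : ∀ k, pvOMin x y = some k → a ≤ k := by
  intro k h
  cases x with
  | none => exact hy k h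
  | some b =>
    cases y with
    | none => simp [pvOMin] at h; exact h ▸ hx b rfl
    | some c =>
      simp [pvOMin] at h
      have h1 := hx b rfl; have h2 := hy c rfl
      omega

theorem pvOMin_left (a : Int) (y : Option Int) (hy : ∀ k, y = some k → a ≤ k) : pvOMin (some a) y = some a := by
  cases y with
  | none => rfl
  | some b => simp [pvOMin]; have := hy b rfl; omega

theorem pvOMin_right (x : Option Int) (a : Int) (hx : ∀ k, x = some k → a ≤ k) : pvOMin x (some a) = some a := by
  cases x with
  | none => rfl
  | some b => simp [pvOMin]; have := hx b rfl; omega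

-- A's fused scan over the zip, with predicates abstracted (same recursion shape as pvALoop)
def pvALoopG (p1 p2 p3 : String → Bool) : List (String × String) → Int → Option Int
  | [], _ => none
  | (uri, text) :: rest, i =>
    if p1 uri then some (i + 1)
    else if p2 uri then some (i + 1)
    else if p3 text then some (i + 1)
    else pvALoopG p1 p2 p3 rest (i + 1)

theorem pvALoop_eq_G (ed ec ecit : Option String) : ∀ (l : List (String × String)) (i : Int), pvALoop ed ec ecit l i = pvALoopG (fun u => match ed with | some s => PySem.Str.isIn s u | none => false) (fun u => match ec with | some s => PySem.Str.isIn s u || PySem.Str.isIn u s | none => false) (fun t => match ecit with | some s => PySem.Str.isIn (PySem.Str.lower s) (PySem.Str.lower t) | none => false) l i := by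
  intro l
  induction l with
  | nil => intro i; rfl
  | cons ut rest ih =>
    intro i
    obtain ⟨uri, text⟩ := ut
    simp only [pvALoop, pvALoopG, ih]

-- a none-expected value is a constantly false predicate
theorem pvFirstRank_false : ∀ (xs : List String) (i : Int), pvFirstRank (fun _ => false) xs i = none := by
  intro xs
  induction xs with
  | nil => intro i; rfl
  | cons x xs ih => intro i; simp [pvFirstRank, ih]

-- the fused scan equals the min of the three truncated single-criterion scans
theorem pvMain (p1 p2 p3 : String → Bool) : ∀ (us ts : List String) (i : Int),
    pvALoopG p1 p2 p3 (us.zip ts) i =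
      pvOMin (pvFirstRank p1 (us.take (min us.length ts.length)) (i + 1))
        (pvOMin (pvFirstRank p2 (us.take (min us.length ts.length)) (i + 1))
          (pvFirstRank p3 (ts.take (min us.length ts.length)) (i + 1))) := by
  intro us
  induction us with
  | nil => intro ts i; simp [pvALoopG, pvFirstRank, pvOMin]
  | cons u us ih =>
    intro ts i
    cases ts with
    | nil => simp [pvALoopG, pvFirstRank, pvOMin]
    | cons t ts =>
      have hmin : min (u :: us).length (t :: ts).length = (min us.length ts.length) + 1 := by
        simp [List.length_cons]
      rw [hmin]
      simp only [List.zip_cons_cons, List.take_succ_cons, pvALoopG, pvFirstRank]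
      set n := min us.length ts.length with hn
      have lb1 := pvFirstRank_lb p1 (us.take n) (i + 1 + 1)
      have lb2 := pvFirstRank_lb p2 (us.take n) (i + 1 + 1)
      have lb3 := pvFirstRank_lb p3 (ts.take n) (i + 1 + 1)
      have hb2 : ∀ k, (if p2 u then some (i + 1) else pvFirstRank p2 (us.take n) (i + 1 + 1)) = some k → i + 1 ≤ k := by
        intro k hk
        by_cases h2 : p2 u
        · simp [h2] at hk; omega
        · simp [h2] at hk; have := lb2 k hk; omega
      have hb3 : ∀ k, (if p3 t then some (i + 1) else pvFirstRank p3 (ts.take n) (i + 1 + 1)) = some k → i + 1 ≤ k := by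
        intro k hk
        by_cases h3 : p3 t
        · simp [h3] at hk; omega
        · simp [h3] at hk; have := lb3 k hk; omega
      by_cases h1 : p1 u
      · simp only [h1, if_true]
        exact (pvOMin_left (i + 1) _ (pvOMin_lb _ _ (i + 1) hb2 hb3)).symm
      · simp only [h1, Bool.false_eq_true, if_false]
        by_cases h2 : p2 u
        · simp only [h2, if_true]
          rw [pvOMin_left (i + 1) _ hb3]
          rw [pvOMin_right _ (i + 1) (fun k hk => by have := lb1 k hk; omega)]
        · simp only [h2, Bool.false_eq_true, if_false]
          by_cases h3 : p3 t
          · simp only [h3, if_true]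
            rw [pvOMin_right _ (i + 1) (fun k hk => by have := lb2 k hk; omega)]
            rw [pvOMin_right _ (i + 1) (fun k hk => by have := lb1 k hk; omega)]
          · simp only [h3, Bool.false_eq_true, if_false]
            have := ih ts (i + 1)
            rw [← hn] at this
            exact this

-- ===== VERDICT (by name: the statement is the Claim_ definition above) =====
theorem compute_rank_of_expected_py_spec : Claim_equal_compute_rank_of_expected_py := by
  intro query us ed ec ecit ts _
  unfold Spec_compute_rank_of_expected_py compute_rank_of_expected_py compute_rank_of_expected_py_alt
  rw [pvALoop_eq_G, pvMain]
  have hz : (0 : Int) + 1 = 1 := by norm_num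
  rw [hz]
  congr 1
  · cases ed with
    | none => exact (pvFirstRank_false _ 1)
    | some s => rfl
  congr 1
  · cases ec with
    | none => exact (pvFirstRank_false _ 1)
    | some s => rfl
  · cases ecit with
    | none => exact (pvFirstRank_false _ 1)
    | some s => rfl
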